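-- pv_equiv track=rewrite | github.com/meimchu/AdventOfCode | 2021/day3.py | solver_a
-- ===== SOURCE A (Python) =====
-- def solver_a(bit_list):
--     bit_dict = {}
--     for bits in bit_list:
--         for i, bit in enumerate(bits):
--             if i not in bit_dict:
--                 bit_dict[i] = 0
--             if bit == '1':
--                 bit_dict[i] += 1
--
--     gamma_rate = []
--     epsilon_rate = []
--     for k, v in bit_dict.items():
--         if v > len(bit_list) // 2:
--             gamma_rate.append('1')
--             epsilon_rate.append('0')
--         else:
--             epsilon_rate.append('1')
--             gamma_rate.append('0')
--
--     gamma_dec = int(''.join(gamma_rate), 2)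
--     epsilon_dec = int(''.join(epsilon_rate), 2)
--
--     return gamma_dec * epsilon_dec
-- ===== SOURCE B (Python) =====
-- def solver_a(bit_list):
--     width = max((len(b) for b in bit_list), default=0)
--     half = len(bit_list) // 2
--     gamma = 0
--     epsilon = 0
--     for i in range(width):
--         ones = sum(1 for b in bit_list if i < len(b) and b[i] == '1')
--         gamma = 2 * gamma + (1 if ones > half else 0)
--         epsilon = 2 * epsilon + (0 if ones > half else 1)
--     return gamma * epsilon
-- ===== Notes on version B (the rewrite author's own statement) =====
-- stated objective: alternative
-- what changed: Replaced A's row-wise dict accumulation followed by building '0'/'1' strings and re-parsing them with int(,2) by a column-first pass that counts ones per column directly and accumulates gamma/epsilon as integers arithmetically (no dict, no string building or parsing).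
import Mathlib
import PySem

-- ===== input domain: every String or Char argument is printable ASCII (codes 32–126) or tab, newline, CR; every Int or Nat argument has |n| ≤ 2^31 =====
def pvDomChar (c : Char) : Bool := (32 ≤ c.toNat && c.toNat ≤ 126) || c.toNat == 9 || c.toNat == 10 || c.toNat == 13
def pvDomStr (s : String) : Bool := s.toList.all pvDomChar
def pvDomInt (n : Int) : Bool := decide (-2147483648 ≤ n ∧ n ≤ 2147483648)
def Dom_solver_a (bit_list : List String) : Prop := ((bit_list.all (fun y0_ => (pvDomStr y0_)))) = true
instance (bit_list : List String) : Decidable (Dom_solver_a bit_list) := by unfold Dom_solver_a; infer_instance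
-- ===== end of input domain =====

-- B replaces A's dict accumulation + binary-string building/parsing by a column-first
-- counting pass that accumulates gamma/epsilon arithmetically (objective: alternative).

-- ===== PORT A =====
-- hand port of int(s, 2): exact for the strings this program builds, i.e. strings made
-- only of '0'/'1' digit characters (no sign/whitespace/prefix/underscore can occur in the
-- joined rate strings); none = the ValueError int('', 2) raises on the empty string.
def intBase2? (cs : List Char) : Option Int :=
  match cs with
  | [] => none
  | _ => some (cs.foldl (fun a c => 2 * a + (if c = '1' then 1 else 0)) 0)

-- body of A's inner loop: 'if i not in bit_dict: bit_dict[i] = 0; if bit == "1": bit_dict[i] += 1'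
def solver_aStep (d : PySem.Dict Int Int) (p : Int × Char) : PySem.Dict Int Int :=
  let d' := if d.contains p.1 then d else d.insert p.1 0
  if p.2 = '1' then d'.modify p.1 0 (· + 1) else d'

-- 'for i, bit in enumerate(bits): …'
def solver_aRow (d : PySem.Dict Int Int) (bits : String) : PySem.Dict Int Int :=
  (PySem.List.enumerate bits.toList).foldl solver_aStep d

def solver_a (bit_list : List String) : Int :=
  let bit_dict := bit_list.foldl solver_aRow PySem.Dict.empty
  let gr_er := bit_dict.items.foldl
    (fun (p : List Char × List Char) kv =>
      if kv.2 > PySem.Int.floordiv (bit_list.length : Int) 2 then (p.1 ++ ['1'], p.2 ++ ['0'])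
      else (p.1 ++ ['0'], p.2 ++ ['1'])) ([], [])
  let gamma_dec := (intBase2? gr_er.1).getD 0
  let epsilon_dec := (intBase2? gr_er.2).getD 0
  gamma_dec * epsilon_dec

-- ===== PORT B =====
def solver_a_alt (bit_list : List String) : Int :=
  let width := PySem.List.maxD (bit_list.map (fun b => (PySem.Str.len b : Int))) (fun y => y) 0
  let half := PySem.Int.floordiv (bit_list.length : Int) 2
  let ge := (PySem.List.pyRange 0 width).foldl
    (fun (p : Int × Int) i =>
      let ones := bit_list.foldl
        (fun acc b => if i < (PySem.Str.len b : Int) ∧ PySem.Str.pyGet? b i = some '1'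
                      then acc + 1 else acc) (0 : Int)
      (2 * p.1 + (if ones > half then 1 else 0),
       2 * p.2 + (if ones > half then 0 else 1))) ((0 : Int), (0 : Int))
  ge.1 * ge.2

-- ===== PRECONDITION & SPEC =====
-- Pre_ excludes exactly the inputs on which A raises ValueError (int('', 2)): those where
-- every string is empty (in particular the empty list), so no column ever exists.
def Pre_solver_a (bit_list : List String) : Prop := ∃ b ∈ bit_list, b.toList ≠ []
instance (bit_list : List String) : Decidable (Pre_solver_a bit_list) := by unfold Pre_solver_a; infer_instance
def pvWitness_solver_a : List String := (["1", "0"])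

def Spec_solver_a (bit_list : List String) (out : Int) : Prop := out = solver_a_alt bit_list
instance (bit_list : List String) (out : Int) : Decidable (Spec_solver_a bit_list out) := by unfold Spec_solver_a; infer_instance

-- ===== CLAIM (what is proved, stated in full; the proofs are below) =====
def Claim_equal_solver_a : Prop := ∀ (bit_list : List String), Dom_solver_a bit_list → Pre_solver_a bit_list → Spec_solver_a bit_list (solver_a bit_list)

-- ===== LEMMAS AND PROOFS =====

-- proof-side abbreviations: max width, per-column ones count, the tie threshold
def pvW (bl : List String) : Nat := bl.foldl (fun m b => max m b.toList.length) 0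
def pvCnt (bl : List String) (i : Nat) : Int :=
  (bl.map (fun b => if b.toList[i]? = some '1' then (1 : Int) else 0)).sum
def pvHalf (bl : List String) : Int := PySem.Int.floordiv (bl.length : Int) 2
-- contribution of one row (chars cs, enumerated from s) to dict entry j
def chCount (cs : List Char) (s j : Int) : Int :=
  if cs[(j - s).toNat]? = some '1' ∧ s ≤ j then 1 else 0

lemma step_getD (d : PySem.Dict Int Int) (p : Int × Char) (j : Int) :
    (solver_aStep d p).getD j 0 = d.getD j 0 + (if j = p.1 ∧ p.2 = '1' then 1 else 0) := by
  unfold solver_aStep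
  by_cases hc : d.contains p.1 <;> by_cases h1 : p.2 = '1' <;>
    simp [hc, h1, PySem.Dict.getD_modify, PySem.Dict.getD_insert]
  · by_cases hj : j = p.1 <;> simp [hj]
  · by_cases hj : j = p.1 <;>
      simp [hj, PySem.Dict.getD_of_not_contains _ _ (by simpa using hc)]
  · by_cases hj : j = p.1 <;>
      simp [hj, PySem.Dict.getD_of_not_contains _ _ (by simpa using hc)]

lemma row_getD (cs : List Char) (s : Int) (d : PySem.Dict Int Int) (j : Int) :
    ((PySem.List.enumerate cs s).foldl solver_aStep d).getD j 0
      = d.getD j 0 + chCount cs s j := by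
  induction cs generalizing s d with
  | nil => simp [PySem.List.enumerate_nil, chCount]
  | cons c cs ih =>
    rw [PySem.List.enumerate_cons, List.foldl_cons, ih, step_getD]
    have hcomb : (if j = s ∧ c = '1' then (1:Int) else 0) + chCount cs (s+1) j
        = chCount (c :: cs) s j := by
      unfold chCount
      by_cases hj : j = s
      · by_cases h1 : c = '1'
        · simp [hj, h1]
        · simp [hj, h1]
      · by_cases hle : s ≤ j
        · have h1 : (j - s).toNat = (j - (s+1)).toNat + 1 := by omega
          simp [hj, h1, hle, show s + 1 ≤ j by omega]
        · have h0 : ¬ s + 1 ≤ j := by omega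
          simp [hj, hle, h0]
    rw [← hcomb]; ring

lemma dict_getD (bl : List String) (d : PySem.Dict Int Int) (j : Int) :
    (bl.foldl solver_aRow d).getD j 0
      = d.getD j 0 + (bl.map (fun b => chCount b.toList 0 j)).sum := by
  induction bl generalizing d with
  | nil => simp
  | cons b bl ih =>
    rw [List.foldl_cons, ih, List.map_cons, List.sum_cons]
    unfold solver_aRow
    rw [row_getD]
    ring

lemma step_keys (d : PySem.Dict Int Int) (p : Int × Char) :
    (solver_aStep d p).keys = PySem.Set.add d.keys p.1 := by
  have hck : PySem.Set.contains d.keys p.1 = d.contains p.1 := by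
    rw [PySem.Set.contains_eq_listContains, Bool.eq_iff_iff]
    simp [PySem.Dict.contains_iff_mem_keys]
  unfold solver_aStep PySem.Set.add
  rw [hck]
  by_cases hc : d.contains p.1
  · rw [if_pos hc, if_pos hc]
    by_cases h1 : p.2 = '1'
    · rw [if_pos h1, PySem.Dict.keys_modify, PySem.Dict.keys_insert_of_contains d _ hc]
    · rw [if_neg h1]
  · have hc' : d.contains p.1 = false := by simpa using hc
    rw [if_neg hc, if_neg hc]
    by_cases h1 : p.2 = '1'
    · rw [if_pos h1, PySem.Dict.keys_modify, PySem.Dict.insert_insert_self,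
          PySem.Dict.keys_insert_of_not_contains d _ hc']
    · rw [if_neg h1, PySem.Dict.keys_insert_of_not_contains d _ hc']

lemma fold_step_keys (l : List (Int × Char)) (d : PySem.Dict Int Int) :
    (l.foldl solver_aStep d).keys = PySem.Set.update d.keys (l.map (·.1)) := by
  induction l generalizing d with
  | nil => simp [PySem.Set.update]
  | cons x l ih =>
    rw [List.foldl_cons, ih, List.map_cons, PySem.Set.update_cons, step_keys]

lemma update_range (w L : Nat) :
    PySem.Set.update ((List.range w).map Int.ofNat) ((List.range L).map Int.ofNat)
      = (List.range (max w L)).map Int.ofNat := by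
  induction L with
  | zero => simp [PySem.Set.update]
  | succ L ih =>
    rw [List.range_succ, List.map_append, PySem.Set.update_append, ih]
    simp only [List.map_cons, List.map_nil]
    rw [show PySem.Set.update ((List.range (max w L)).map Int.ofNat) [Int.ofNat L]
        = PySem.Set.add ((List.range (max w L)).map Int.ofNat) (Int.ofNat L) from rfl]
    unfold PySem.Set.add
    by_cases hL : L < max w L
    · have hmem : Int.ofNat L ∈ (List.range (max w L)).map Int.ofNat :=
        List.mem_map.mpr ⟨L, List.mem_range.mpr (by omega), rfl⟩
      rw [if_pos (by simpa [PySem.Set.contains_eq_listContains, List.contains_iff_mem] using hmem)]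
      congr 2
      omega
    · have hnm : Int.ofNat L ∉ (List.range (max w L)).map Int.ofNat := by
        simp [Int.ofNat_eq_natCast]
        omega
      rw [if_neg (by simpa [PySem.Set.contains_eq_listContains, List.contains_iff_mem] using hnm)]
      rw [show max w (L + 1) = L + 1 by omega, show max w L = L by omega, List.range_succ]
      simp

lemma dict_keys (bl : List String) (w : Nat) (d : PySem.Dict Int Int)
    (h : d.keys = (List.range w).map Int.ofNat) :
    (bl.foldl solver_aRow d).keys
      = (List.range (bl.foldl (fun m b => max m b.toList.length) w)).map Int.ofNat := by
  induction bl generalizing w d with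
  | nil => simpa using h
  | cons b bl ih =>
    rw [List.foldl_cons, List.foldl_cons]
    refine ih (max w b.toList.length) _ ?_
    unfold solver_aRow
    rw [fold_step_keys, PySem.List.map_fst_enumerate, h]
    rw [show (0 : Int) + (b.toList.length : Int) = ((b.toList.length : Nat) : Int) by ring]
    rw [PySem.List.pyRange_zero_natCast]
    rw [show (fun k : Nat => (k : Int)) = Int.ofNat from rfl]
    exact update_range w b.toList.length

lemma chCount_natCast (cs : List Char) (i : Nat) :
    chCount cs 0 (i : Int) = if cs[i]? = some '1' then 1 else 0 := by
  unfold chCount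
  simp

lemma dict_items (bl : List String) :
    (bl.foldl solver_aRow PySem.Dict.empty).items
      = (List.range (pvW bl)).map (fun (i : Nat) => ((i : Int), pvCnt bl i)) := by
  have hkeys : (bl.foldl solver_aRow PySem.Dict.empty).keys
      = (List.range (pvW bl)).map Int.ofNat := by
    refine dict_keys bl 0 _ ?_
    simp [PySem.Dict.keys_empty]
  have hnd : (bl.foldl solver_aRow PySem.Dict.empty).keys.Nodup := by
    rw [hkeys]
    exact (List.nodup_range).map (fun a b h => Int.ofNat.inj h)
  rw [PySem.Dict.items_eq_map_keys _ hnd 0, hkeys, List.map_map]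
  refine List.map_congr_left ?_
  intro i hi
  simp only [Function.comp_apply]
  rw [dict_getD, PySem.Dict.getD_empty]
  congr 1
  rw [zero_add, show (Int.ofNat i) = (i : Int) from rfl]
  unfold pvCnt
  refine congrArg List.sum (List.map_congr_left ?_)
  intro b _
  exact chCount_natCast b.toList i

-- generic counting loop: 'acc += 1 when cond' is the sum of indicator values
lemma count_fold (cond : String → Prop) [DecidablePred cond] (l : List String) (a : Int) :
    l.foldl (fun acc b => if cond b then acc + 1 else acc) a
      = a + (l.map (fun b => if cond b then (1 : Int) else 0)).sum := by
  induction l generalizing a with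
  | nil => simp
  | cons b l ih =>
    rw [List.foldl_cons, ih, List.map_cons, List.sum_cons]
    by_cases h : cond b
    · simp [h]; ring
    · simp [h]

lemma onesB (bl : List String) (i : Nat) :
    bl.foldl (fun acc b => if ((i : Int) < (PySem.Str.len b : Int) ∧ PySem.Str.pyGet? b (i : Int) = some '1')
                      then acc + 1 else acc) (0 : Int) = pvCnt bl i := by
  rw [count_fold]
  rw [zero_add]
  unfold pvCnt
  refine congrArg List.sum (List.map_congr_left ?_)
  intro b _
  by_cases h : b.toList[i]? = some '1'
  · have hlt : i < b.toList.length := by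
      have := List.getElem?_eq_some_iff.mp h
      exact this.1
    rw [if_pos h, if_pos]
    refine ⟨?_, by simpa using h⟩
    · have hL : (PySem.Str.len b) = (b.toList.length : Int) := by simp
      rw [hL]
      omega
  · rw [if_neg h, if_neg]
    intro hcon
    exact h (by simpa using hcon.2)

lemma cast_fold_max (l : List String) (a : Nat) :
    ((l.foldl (fun m b => max m b.toList.length) a : Nat) : Int)
      = (l.map (fun b => (PySem.Str.len b : Int))).foldl max (a : Int) := by
  induction l generalizing a with
  | nil => simp
  | cons b l ih =>
    rw [List.foldl_cons, List.map_cons, List.foldl_cons, ih]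
    congr 1
    have hL : (PySem.Str.len b) = (b.toList.length : Int) := by simp
    rw [hL, Nat.cast_max]

lemma widthB (bl : List String) :
    PySem.List.maxD (bl.map (fun b => (PySem.Str.len b : Int))) (fun y => y) 0 = (pvW bl : Int) := by
  cases bl with
  | nil => simp [PySem.List.maxD_nil, pvW]
  | cons b bl =>
    rw [List.map_cons, PySem.List.maxD_id_cons]
    unfold pvW
    rw [List.foldl_cons, cast_fold_max]
    congr 1

lemma pvW_pos (bl : List String) (h : Pre_solver_a bl) : 1 ≤ pvW bl := by
  obtain ⟨b, hb, hne⟩ := h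
  have := (PySem.List.le_foldl_max_nat bl (fun b => b.toList.length) 0).2 b hb
  have hlen : 1 ≤ b.toList.length := by
    cases hcs : b.toList with
    | nil => exact absurd hcs hne
    | cons x xs => simp
  unfold pvW
  omega

lemma intBase2?_of_ne_nil (cs : List Char) (h : cs ≠ []) :
    intBase2? cs = some (cs.foldl (fun a c => 2 * a + (if c = '1' then 1 else 0)) 0) := by
  cases cs with
  | nil => exact absurd rfl h
  | cons c cs => rfl

-- the common closed form both programs compute
def pvGamma (bl : List String) : Int :=
  (List.range (pvW bl)).foldl (fun a i => 2 * a + (if pvCnt bl i > pvHalf bl then 1 else 0)) 0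
def pvEpsilon (bl : List String) : Int :=
  (List.range (pvW bl)).foldl (fun a i => 2 * a + (if pvCnt bl i > pvHalf bl then 0 else 1)) 0

lemma a_eval (bl : List String) (h : Pre_solver_a bl) :
    solver_a bl = pvGamma bl * pvEpsilon bl := by
  have hW := pvW_pos bl h
  show (intBase2? (((bl.foldl solver_aRow PySem.Dict.empty).items.foldl
      (fun (p : List Char × List Char) kv =>
        if kv.2 > PySem.Int.floordiv (bl.length : Int) 2 then (p.1 ++ ['1'], p.2 ++ ['0'])
        else (p.1 ++ ['0'], p.2 ++ ['1'])) ([], [])).1)).getD 0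
    * (intBase2? (((bl.foldl solver_aRow PySem.Dict.empty).items.foldl
      (fun (p : List Char × List Char) kv =>
        if kv.2 > PySem.Int.floordiv (bl.length : Int) 2 then (p.1 ++ ['1'], p.2 ++ ['0'])
        else (p.1 ++ ['0'], p.2 ++ ['1'])) ([], [])).2)).getD 0 = pvGamma bl * pvEpsilon bl
  rw [dict_items]
  have hsplit : (fun (p : List Char × List Char) kv =>
      if kv.2 > PySem.Int.floordiv (bl.length : Int) 2 then (p.1 ++ ['1'], p.2 ++ ['0'])
      else (p.1 ++ ['0'], p.2 ++ ['1']))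
      = (fun (p : List Char × List Char) (kv : Int × Int) =>
        (p.1 ++ [if kv.2 > PySem.Int.floordiv (bl.length : Int) 2 then '1' else '0'],
         p.2 ++ [if kv.2 > PySem.Int.floordiv (bl.length : Int) 2 then '0' else '1'])) := by
    funext p kv
    by_cases hk : kv.2 > PySem.Int.floordiv (bl.length : Int) 2
    · rw [if_pos hk, if_pos hk, if_pos hk]
    · rw [if_neg hk, if_neg hk, if_neg hk]
  rw [hsplit]
  rw [PySem.List.foldl_prod_mk
    (f := fun (acc : List Char) (kv : Int × Int) => acc ++ [if kv.2 > PySem.Int.floordiv (bl.length : Int) 2 then '1' else '0'])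
    (g := fun (acc : List Char) (kv : Int × Int) => acc ++ [if kv.2 > PySem.Int.floordiv (bl.length : Int) 2 then '0' else '1'])]
  rw [PySem.List.foldl_append_singleton_eq_map, PySem.List.foldl_append_singleton_eq_map,
      List.nil_append, List.nil_append, List.map_map, List.map_map]
  have hne : (List.range (pvW bl)) ≠ [] := by
    intro hcon
    have := List.range_eq_nil.mp hcon
    omega
  rw [intBase2?_of_ne_nil _ (by simpa using hne), intBase2?_of_ne_nil _ (by simpa using hne)]
  simp only [Option.getD_some]
  rw [List.foldl_map, List.foldl_map]
  refine congrArg₂ (· * ·) ?_ ?_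
  · unfold pvGamma
    refine PySem.List.foldl_congr_mem _ _ _ _ ?_
    intro acc i _
    simp only [Function.comp_apply]
    have hfd : pvHalf bl = (bl.length : Int) / 2 :=
      PySem.Int.floordiv_eq_ediv_of_pos (by norm_num)
    by_cases hc : pvCnt bl i > (bl.length : Int) / 2 <;> simp [hfd, hc]
  · unfold pvEpsilon
    refine PySem.List.foldl_congr_mem _ _ _ _ ?_
    intro acc i _
    simp only [Function.comp_apply]
    have hfd : pvHalf bl = (bl.length : Int) / 2 :=
      PySem.Int.floordiv_eq_ediv_of_pos (by norm_num)
    by_cases hc : pvCnt bl i > (bl.length : Int) / 2 <;> simp [hfd, hc]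

lemma b_eval (bl : List String) :
    solver_a_alt bl = pvGamma bl * pvEpsilon bl := by
  show ((PySem.List.pyRange 0 (PySem.List.maxD (bl.map fun b => (PySem.Str.len b : Int)) (fun y => y) 0)).foldl
      (fun (p : Int × Int) i =>
        (2 * p.1 + (if (bl.foldl (fun acc b => if (i < (PySem.Str.len b : Int) ∧ PySem.Str.pyGet? b i = some '1') then acc + 1 else acc) (0:Int)) > PySem.Int.floordiv (bl.length : Int) 2 then 1 else 0),
         2 * p.2 + (if (bl.foldl (fun acc b => if (i < (PySem.Str.len b : Int) ∧ PySem.Str.pyGet? b i = some '1') then acc + 1 else acc) (0:Int)) > PySem.Int.floordiv (bl.length : Int) 2 then 0 else 1))) ((0:Int),(0:Int))).1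
    * ((PySem.List.pyRange 0 (PySem.List.maxD (bl.map fun b => (PySem.Str.len b : Int)) (fun y => y) 0)).foldl
      (fun (p : Int × Int) i =>
        (2 * p.1 + (if (bl.foldl (fun acc b => if (i < (PySem.Str.len b : Int) ∧ PySem.Str.pyGet? b i = some '1') then acc + 1 else acc) (0:Int)) > PySem.Int.floordiv (bl.length : Int) 2 then 1 else 0),
         2 * p.2 + (if (bl.foldl (fun acc b => if (i < (PySem.Str.len b : Int) ∧ PySem.Str.pyGet? b i = some '1') then acc + 1 else acc) (0:Int)) > PySem.Int.floordiv (bl.length : Int) 2 then 0 else 1))) ((0:Int),(0:Int))).2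
    = pvGamma bl * pvEpsilon bl
  rw [widthB, PySem.List.pyRange_zero_natCast, List.foldl_map]
  have hcong := PySem.List.foldl_congr_mem (List.range (pvW bl))
    (fun (p : Int × Int) (i : Nat) =>
      (2 * p.1 + (if (bl.foldl (fun acc b => if ((i:Int) < (PySem.Str.len b : Int) ∧ PySem.Str.pyGet? b (i:Int) = some '1') then acc + 1 else acc) (0:Int)) > PySem.Int.floordiv (bl.length : Int) 2 then 1 else 0),
       2 * p.2 + (if (bl.foldl (fun acc b => if ((i:Int) < (PySem.Str.len b : Int) ∧ PySem.Str.pyGet? b (i:Int) = some '1') then acc + 1 else acc) (0:Int)) > PySem.Int.floordiv (bl.length : Int) 2 then 0 else 1)))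
    (fun (p : Int × Int) (i : Nat) =>
      (2 * p.1 + (if pvCnt bl i > PySem.Int.floordiv (bl.length : Int) 2 then 1 else 0),
       2 * p.2 + (if pvCnt bl i > PySem.Int.floordiv (bl.length : Int) 2 then 0 else 1))) ((0:Int), (0:Int))
    (by intro acc i _; simp only; rw [onesB bl i])
  rw [hcong]
  rw [PySem.List.foldl_prod_mk
    (f := fun (a : Int) (i : Nat) => 2 * a + (if pvCnt bl i > PySem.Int.floordiv (bl.length : Int) 2 then 1 else 0))
    (g := fun (a : Int) (i : Nat) => 2 * a + (if pvCnt bl i > PySem.Int.floordiv (bl.length : Int) 2 then 0 else 1))]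
  simp only [pvGamma, pvEpsilon, pvHalf]
  rfl

-- ===== VERDICT (by name: the statement is the Claim_ definition above) =====
theorem solver_a_spec : Claim_equal_solver_a := by
  intro bl _ hpre
  unfold Spec_solver_a
  rw [a_eval bl hpre, b_eval bl]
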